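-- pv_equiv track=rewrite | github.com/gohdong/algorithm | programmers/17687.py | solution
-- ===== SOURCE A (Python) =====
-- def solution(n, t, m, p):
--     def n_numeric(a, n_th):
--         temp = ""
--         while True:
--             t = a % n_th
--             if t >= 10:
--                 if t == 10:
--                     temp += "A"
--                 if t == 11:
--                     temp += "B"
--                 if t == 12:
--                     temp += "C"
--                 if t == 13:
--                     temp += "D"
--                 if t == 14:
--                     temp += "E"
--                 if t == 15:
--                     temp += "F"
--             else:
--                 temp += str(t)
--             a = a // n_th
--             if not a:
--                 break
--         return temp[::-1]
--
--     total = ""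
--     answer = ""
--     start = 0
--     for _ in range(t):
--         for a in range(m):
--             total += n_numeric(start, n)
--             start += 1
--
--     for i in range(t):
--         answer += total[(p - 1) + m * i]
--
--     return answer
-- ===== SOURCE B (Python) =====
-- def solution(n, t, m, p):
--     DIGITS = "0123456789ABCDEF"
--
--     def char_at(idx):
--         # idx-th char of the infinite stream of base-n reps of 0,1,2,...
--         # skip whole blocks of equal-digit-count numbers, then extract one digit.
--         d, start, count = 1, 0, n
--         while idx >= count * d:
--             idx -= count * d
--             d += 1
--             start = n ** (d - 1)
--             count = start * (n - 1)
--         num = start + idx // d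
--         pos = idx % d
--         return DIGITS[(num // n ** (d - 1 - pos)) % n]
--
--     return "".join(char_at(p - 1 + m * i) for i in range(t))
-- ===== Notes on version B (the rewrite author's own statement) =====
-- stated objective: faster
-- what changed: B never materialises the digit stream: for each of the t sampled positions it arithmetically skips whole blocks of equal-digit-count numbers to locate which number and which digit the position falls on, and extracts that single digit by division, instead of A's nested loops concatenating all t*m base-n representations and indexing into the result.
-- outside the precondition, e.g. on solution(17, 2, 17, 17): A returns '18', B raises IndexError; on solution(16, 6, 7, -4): A returns '729131', B returns 'B29131'; on solution(2, 2, 2, 4): A returns '01', B returns '01'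
import Mathlib
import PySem

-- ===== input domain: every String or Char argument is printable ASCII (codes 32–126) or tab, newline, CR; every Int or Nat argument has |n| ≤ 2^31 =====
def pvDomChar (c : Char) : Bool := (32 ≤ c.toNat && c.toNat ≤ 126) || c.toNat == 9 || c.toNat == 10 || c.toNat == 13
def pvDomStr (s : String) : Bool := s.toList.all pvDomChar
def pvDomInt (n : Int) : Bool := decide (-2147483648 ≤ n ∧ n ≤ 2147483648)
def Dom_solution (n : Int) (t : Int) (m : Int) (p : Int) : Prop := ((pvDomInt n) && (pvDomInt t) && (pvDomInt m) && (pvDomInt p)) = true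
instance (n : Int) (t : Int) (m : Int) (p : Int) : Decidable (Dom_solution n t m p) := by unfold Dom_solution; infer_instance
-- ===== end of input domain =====

-- B never materialises the digit stream A concatenates: it locates each of the t sampled stream
-- positions directly, skipping whole equal-digit-count blocks arithmetically and extracting a single
-- digit of the identified number (objective: faster; per-position work replaces the full t*m build).


-- ===== PORT A =====
-- A's if-ladder appending the digit character for t (the 'if t >= 10: … else: temp += str(t)' block), verbatim.
def pvDigitAppend (temp : List Char) (t : Int) : List Char :=
  if t ≥ 10 then
    let temp := if t = 10 then temp ++ ['A'] else temp
    let temp := if t = 11 then temp ++ ['B'] else temp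
    let temp := if t = 12 then temp ++ ['C'] else temp
    let temp := if t = 13 then temp ++ ['D'] else temp
    let temp := if t = 14 then temp ++ ['E'] else temp
    if t = 15 then temp ++ ['F'] else temp
  else temp ++ PySem.Int.toChars t

-- A's 'while True' loop, made structural with fuel a.natAbs + 1 (a strictly decreases inside Pre_).
def pvNNumLoop : Nat → Int → Int → List Char → List Char
  | 0, _, _, temp => temp
  | fuel+1, a, n_th, temp =>
    let t := PySem.Int.mod a n_th
    let temp := pvDigitAppend temp t
    let a' := PySem.Int.floordiv a n_th
    if a' = 0 then temp else pvNNumLoop fuel a' n_th temp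

-- n_numeric(a, n_th): build lsd-first, reverse at the end (temp[::-1]).
def pvNNumeric (a n_th : Int) : List Char :=
  (pvNNumLoop (a.natAbs + 1) a n_th []).reverse

def solution (n : Int) (t : Int) (m : Int) (p : Int) : String :=
  let st := (PySem.List.pyRange 0 t 1).foldl
      (fun (st : List Char × Int) _ =>
        (PySem.List.pyRange 0 m 1).foldl
          (fun st _ => (st.1 ++ pvNNumeric st.2 n, st.2 + 1)) st)
      ([], 0)
  let total := st.1
  let answer := (PySem.List.pyRange 0 t 1).foldl
      (fun ans i => ans ++ [PySem.List.pyGetD total ((p - 1) + m * i) ' ']) ([] : List Char)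
  String.ofList answer

-- ===== PORT B =====
-- DIGITS = "0123456789ABCDEF"
def pvDigitsTable : List Char :=
  ['0','1','2','3','4','5','6','7','8','9','A','B','C','D','E','F']

-- B's 'while idx >= count * d' loop; the trailing num/pos/digit computation of char_at is the exit
-- branch.  Fuel idx.natAbs + 1 (idx strictly decreases inside Pre_).  Python's n ** e is ported as
-- n ^ e.toNat, exact here because every exponent B forms (d - 1 after 'd += 1', d - 1 - pos) is ≥ 0.
def pvCharLoop (n : Int) : Nat → Int → Int → Int → Int → Char
  | 0, _, _, _, _ => ' '
  | fuel+1, idx, d, start, count =>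
    if count * d ≤ idx then
      pvCharLoop n fuel (idx - count * d) (d + 1) (n ^ d.toNat) (n ^ d.toNat * (n - 1))
    else
      let num := start + PySem.Int.floordiv idx d
      let pos := PySem.Int.mod idx d
      PySem.List.pyGetD pvDigitsTable
        (PySem.Int.mod (PySem.Int.floordiv num (n ^ (d - 1 - pos).toNat)) n) ' '

-- char_at(idx): d, start, count = 1, 0, n
def pvCharAt (n idx : Int) : Char := pvCharLoop n (idx.natAbs + 1) idx 1 0 n

def solution_alt (n : Int) (t : Int) (m : Int) (p : Int) : String :=
  String.ofList ((PySem.List.pyRange 0 t 1).map (fun i => pvCharAt n (p - 1 + m * i)))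

-- ===== PRECONDITION & SPEC =====
-- Pre_ is the puzzle's contract (programmers 17687: 2 ≤ n ≤ 16, t ≥ 1, 1 ≤ p ≤ m) plus the whole
-- degenerate region t ≤ 0, where both programs return "".  Excluded inputs on which A still returns
-- a value are defensible-corner artefacts: n outside 2..16 makes A's if-ladder silently drop digit
-- values ≥ 16 (and n ≤ 1 diverges or raises); p < 1 hits Python's negative-index wraparound; p > m
-- samples past the m-aligned block, where A raises IndexError on some inputs and agrees with B on
-- the rest.
def Pre_solution (n : Int) (t : Int) (m : Int) (p : Int) : Prop :=
  (2 ≤ n ∧ n ≤ 16 ∧ 1 ≤ t ∧ 1 ≤ m ∧ 1 ≤ p ∧ p ≤ m) ∨ t ≤ 0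
instance (n : Int) (t : Int) (m : Int) (p : Int) : Decidable (Pre_solution n t m p) := by
  unfold Pre_solution; infer_instance

def pvWitness_solution : Int × Int × Int × Int := (2, 1, 1, 1)

def Spec_solution (n : Int) (t : Int) (m : Int) (p : Int) (out : String) : Prop := out = solution_alt n t m p
instance (n : Int) (t : Int) (m : Int) (p : Int) (out : String) : Decidable (Spec_solution n t m p out) := by unfold Spec_solution; infer_instance

-- ===== CLAIM (what is proved, stated in full; the proofs are below) =====
def Claim_equal_solution : Prop := ∀ (n : Int) (t : Int) (m : Int) (p : Int), Dom_solution n t m p → Pre_solution n t m p → Spec_solution n t m p (solution n t m p)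

-- ===== LEMMAS AND PROOFS =====

-- Reference lsd-first digit list of a in base n (the do-while shape of A's inner loop).
def pvR : Nat → Int → Int → List Char
  | 0, _, _ => []
  | fuel+1, a, n =>
    PySem.List.pyGetD pvDigitsTable (PySem.Int.mod a n) ' ' ::
      (if PySem.Int.floordiv a n = 0 then [] else pvR fuel (PySem.Int.floordiv a n) n)

-- The stream of A's representations of the numbers in [a, b).
def pvG (n a b : Int) : List Char :=
  (PySem.List.pyRange a b 1).flatMap (fun x => pvNNumeric x n)

lemma pv_floordiv_bounds (a n : Int) (h1 : 1 ≤ a) (hn : 2 ≤ n) :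
    0 ≤ PySem.Int.floordiv a n ∧ PySem.Int.floordiv a n < a := by
  rw [PySem.Int.floordiv_eq_ediv_of_pos (by omega)]
  refine ⟨Int.ediv_nonneg (by omega) (by omega), ?_⟩
  apply Int.ediv_lt_of_lt_mul (by omega); nlinarith

lemma pvDigitAppend_eq (temp : List Char) (t : Int) (h0 : 0 ≤ t) (h16 : t < 16) :
    pvDigitAppend temp t = temp ++ [PySem.List.pyGetD pvDigitsTable t ' '] := by
  interval_cases t <;> simp [pvDigitAppend, pvDigitsTable, PySem.Int.toChars] <;> rfl

lemma pvR_fuel : ∀ (f g : Nat) (a n : Int), 0 ≤ a → 2 ≤ n → a.natAbs < f → a.natAbs < g →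
    pvR f a n = pvR g a n := by
  intro f
  induction f with
  | zero => intro g a n _ _ hf; omega
  | succ f ih =>
    intro g a n h0 hn hf hg
    match g with
    | 0 => omega
    | g+1 =>
      simp only [pvR]
      by_cases hz : PySem.Int.floordiv a n = 0
      · simp [hz]
      · have h1 : 1 ≤ a := by
          rcases lt_or_ge a 1 with h | h
          · exfalso; apply hz
            have : a = 0 := by omega
            subst this
            simp [PySem.Int.floordiv]
          · exact h
        obtain ⟨hd0, hdlt⟩ := pv_floordiv_bounds a n h1 hn
        simp only [hz, if_false]
        rw [ih g _ n hd0 hn (by omega) (by omega)]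

lemma pvNNumLoop_eq : ∀ (fuel : Nat) (a n : Int) (temp : List Char), 0 ≤ a → 2 ≤ n → n ≤ 16 →
    a.natAbs < fuel → pvNNumLoop fuel a n temp = temp ++ pvR (a.natAbs + 1) a n := by
  intro fuel
  induction fuel with
  | zero => intro a n temp _ _ _ hf; omega
  | succ fuel ih =>
    intro a n temp h0 hn hn16 hf
    have hmod0 : 0 ≤ PySem.Int.mod a n := PySem.Int.mod_nonneg a (by omega)
    have hmodlt : PySem.Int.mod a n < n := PySem.Int.mod_lt a (by omega)
    simp only [pvNNumLoop, pvR]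
    rw [pvDigitAppend_eq _ _ hmod0 (by omega)]
    by_cases hz : PySem.Int.floordiv a n = 0
    · simp [hz]
    · have h1 : 1 ≤ a := by
        rcases lt_or_ge a 1 with h | h
        · exfalso; apply hz
          have : a = 0 := by omega
          subst this; simp [PySem.Int.floordiv]
        · exact h
      obtain ⟨hd0, hdlt⟩ := pv_floordiv_bounds a n h1 hn
      simp only [hz, if_false]
      rw [ih _ n _ hd0 hn hn16 (by omega)]
      rw [pvR_fuel ((PySem.Int.floordiv a n).natAbs + 1) a.natAbs _ n hd0 hn (by omega) (by omega)]
      simp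

lemma pvNNumeric_eq_rev (a n : Int) (h0 : 0 ≤ a) (hn : 2 ≤ n) (hn16 : n ≤ 16) :
    pvNNumeric a n = (pvR (a.natAbs + 1) a n).reverse := by
  unfold pvNNumeric
  rw [pvNNumLoop_eq _ a n [] h0 hn hn16 (by omega)]
  simp

-- lsd-first digit formula: for x with exactly d base-n digits, pvR lists x / n^j % n for j < d.
lemma pvR_digits (n : Int) (hn : 2 ≤ n) : ∀ (d : Nat) (x : Int), 1 ≤ d →
    0 ≤ x → x < n ^ d → (d = 1 ∨ n ^ (d - 1) ≤ x) →
    pvR (x.natAbs + 1) x n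
      = (List.range d).map (fun j => PySem.List.pyGetD pvDigitsTable (x / n ^ j % n) ' ') := by
  intro d
  induction d with
  | zero => intro x h; omega
  | succ d ih =>
    intro x _ h0 hub hlb
    have hnpos : (0:Int) < n := by omega
    have hmd : PySem.Int.mod x n = x % n := PySem.Int.mod_eq_emod_of_pos hnpos
    have hfd : PySem.Int.floordiv x n = x / n := PySem.Int.floordiv_eq_ediv_of_pos hnpos
    match d, ih with
    | 0, _ =>
      have hxn : x < n := by simpa using hub
      have hz : x / n = 0 := Int.ediv_eq_zero_of_lt h0 hxn
      simp only [pvR, hmd, hfd, hz]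
      simp
    | d+1, ih =>
      have hpow : (0:Int) < n ^ (d + 1) := by positivity
      have hlbx : n ^ (d + 1) ≤ x := by
        rcases hlb with h | h
        · omega
        · simpa using h
      have hx1 : 1 ≤ x := by nlinarith
      set q := x / n with hq
      have hq0 : 0 ≤ q := Int.ediv_nonneg h0 (by omega)
      have hqlb : n ^ d ≤ q := by
        rw [hq, Int.le_ediv_iff_mul_le hnpos, ← pow_succ]
        exact hlbx
      have hqub : q < n ^ (d + 1) := by
        rw [hq, Int.ediv_lt_iff_lt_mul hnpos, ← pow_succ]
        simpa using hub
      have hq1 : 1 ≤ q := by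
        have : (1:Int) ≤ n ^ d := one_le_pow₀ (by omega)
        omega
      have hqx : q < x := by
        rw [hq]
        apply Int.ediv_lt_of_lt_mul (by omega); nlinarith
      have hqne : PySem.Int.floordiv x n ≠ 0 := by rw [hfd]; omega
      simp only [pvR, hmd, hfd]
      rw [if_neg (show ¬ q = 0 by omega)]
      rw [pvR_fuel x.natAbs (q.natAbs + 1) q n hq0 hn (by omega) (by omega)]
      rw [ih q (by omega) hq0 hqub (by
        rcases Nat.eq_or_lt_of_le (Nat.one_le_iff_ne_zero.mpr (Nat.succ_ne_zero d)) with h | h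
        · exact Or.inl h.symm
        · right
          have hd1 : 1 ≤ d := by omega
          rw [hq, Int.le_ediv_iff_mul_le hnpos]
          calc n ^ (d + 1 - 1) * n = n ^ (d + 1) := by
                rw [Nat.add_sub_cancel, ← pow_succ]
            _ ≤ x := hlbx)]
      conv_rhs => rw [List.range_succ_eq_map]
      simp only [List.map_cons, List.map_map]
      refine congrArg₂ List.cons ?_ ?_
      · rw [pow_zero, Int.ediv_one]
      · apply List.map_congr_left
        intro j hj
        simp only [Function.comp]
        have : x / n ^ (j + 1) = q / n ^ j := by
          rw [hq, Int.ediv_ediv_of_nonneg (by omega), ← pow_succ']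
        rw [this]


lemma pv_rev_map_range {α : Type} (f : Nat → α) : ∀ d : Nat,
    ((List.range d).map f).reverse = (List.range d).map (fun j => f (d - 1 - j)) := by
  intro d
  induction d with
  | zero => simp
  | succ d ih =>
    conv_lhs => rw [List.range_succ, List.map_append, List.reverse_append]
    conv_rhs => rw [List.range_succ_eq_map]
    simp only [List.map_cons, List.map_map, List.reverse_singleton, List.map_nil,
      List.singleton_append]
    rw [ih]
    refine congrArg₂ List.cons ?_ ?_
    · congr 1
    · apply List.map_congr_left
      intro j hj
      simp only [Function.comp]
      congr 1
      omega

-- msd-first digit formula for A's n_numeric.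
lemma pvNNumeric_digits (n : Int) (hn : 2 ≤ n) (hn16 : n ≤ 16) (d : Nat) (x : Int)
    (hd : 1 ≤ d) (h0 : 0 ≤ x) (hub : x < n ^ d) (hlb : d = 1 ∨ n ^ (d - 1) ≤ x) :
    pvNNumeric x n
      = (List.range d).map (fun j => PySem.List.pyGetD pvDigitsTable (x / n ^ (d - 1 - j) % n) ' ') := by
  rw [pvNNumeric_eq_rev x n h0 hn hn16, pvR_digits n hn d x hd h0 hub hlb, pv_rev_map_range]

lemma pvNNumeric_len (n : Int) (hn : 2 ≤ n) (hn16 : n ≤ 16) (d : Nat) (x : Int)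
    (hd : 1 ≤ d) (h0 : 0 ≤ x) (hub : x < n ^ d) (hlb : d = 1 ∨ n ^ (d - 1) ≤ x) :
    (pvNNumeric x n).length = d := by
  rw [pvNNumeric_digits n hn hn16 d x hd h0 hub hlb]; simp

lemma pv_flatMap_len_const {g : Int → List Char} {d : Nat} : ∀ (l : List Int),
    (∀ x ∈ l, (g x).length = d) → (l.flatMap g).length = l.length * d := by
  intro l
  induction l with
  | nil => simp
  | cons x l ih =>
    intro h
    simp only [List.flatMap_cons, List.length_append, List.length_cons]
    rw [h x (by simp), ih (fun y hy => h y (by simp [hy]))]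
    ring

lemma pv_flatMap_getD {g : Int → List Char} {d : Nat} (hd : 0 < d) : ∀ (l : List Int),
    (∀ x ∈ l, (g x).length = d) → ∀ (idx : Nat), idx < l.length * d →
    (l.flatMap g).getD idx ' ' = (g (l.getD (idx / d) 0)).getD (idx % d) ' ' := by
  intro l
  induction l with
  | nil => intro _ idx h; simp at h
  | cons x l ih =>
    intro h idx hidx
    have hx : (g x).length = d := h x (by simp)
    have hexp : (l.length + 1) * d = l.length * d + d := by ring
    simp only [List.flatMap_cons]
    by_cases hlt : idx < d
    · rw [List.getD_append _ _ _ _ (by omega)]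
      rw [Nat.div_eq_of_lt hlt, Nat.mod_eq_of_lt hlt]
      simp
    · rw [List.getD_append_right _ _ _ _ (by omega)]
      rw [hx]
      rw [ih (fun y hy => h y (by simp [hy])) (idx - d)
        (by simp only [List.length_cons] at hidx; omega)]
      have h1 : idx / d = (idx - d) / d + 1 := by
        have h := Nat.add_div_right (idx - d) hd
        rw [show idx - d + d = idx by omega] at h
        exact h
      have h2 : idx % d = (idx - d) % d := by
        have h := Nat.add_mod_right (idx - d) d
        rw [show idx - d + d = idx by omega] at h
        exact h
      rw [h1, h2]
      simp

-- Splitting and measuring the stream.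
lemma pvG_split (n a b c : Int) (h1 : a ≤ b) (h2 : b ≤ c) :
    pvG n a c = pvG n a b ++ pvG n b c := by
  unfold pvG
  rw [PySem.List.pyRange_one_append a b c h1 h2, List.flatMap_append]

lemma pvG_block_len (n : Int) (hn2 : 2 ≤ n) (hn16 : n ≤ 16) (d : Nat) (hd : 1 ≤ d)
    (a b : Int) (h0 : 0 ≤ a) (hub : b ≤ n ^ d) (hlb : d = 1 ∨ n ^ (d - 1) ≤ a) :
    (pvG n a b).length = (b - a).toNat * d := by
  unfold pvG
  rw [pv_flatMap_len_const _ (fun x hx => ?_), PySem.List.length_pyRange_one]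
  obtain ⟨hax, hxb⟩ := PySem.List.mem_pyRange_one.mp hx
  exact pvNNumeric_len n hn2 hn16 d x hd (by omega) (lt_of_lt_of_le hxb hub)
    (by rcases hlb with h | h
        · exact Or.inl h
        · exact Or.inr (le_trans h hax))

lemma pvG_block_getD (n : Int) (hn2 : 2 ≤ n) (hn16 : n ≤ 16) (d : Nat) (hd : 1 ≤ d)
    (a b : Int) (h0 : 0 ≤ a) (hub : b ≤ n ^ d) (hlb : d = 1 ∨ n ^ (d - 1) ≤ a)
    (idx : Nat) (hidx : idx < (b - a).toNat * d) :
    (pvG n a b).getD idx ' '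
      = PySem.List.pyGetD pvDigitsTable
          ((a + ((idx / d : Nat) : Int)) / n ^ (d - 1 - idx % d) % n) ' ' := by
  have hlens : ∀ x ∈ PySem.List.pyRange a b 1, (pvNNumeric x n).length = d := by
    intro x hx
    obtain ⟨hax, hxb⟩ := PySem.List.mem_pyRange_one.mp hx
    exact pvNNumeric_len n hn2 hn16 d x hd (by omega) (lt_of_lt_of_le hxb hub)
      (by rcases hlb with h | h
          · exact Or.inl h
          · exact Or.inr (le_trans h hax))
  have hidx' : idx < (PySem.List.pyRange a b 1).length * d := by
    rw [PySem.List.length_pyRange_one]; exact hidx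
  unfold pvG
  rw [pv_flatMap_getD (by omega) _ hlens idx hidx']
  have hk : idx / d < (PySem.List.pyRange a b 1).length := by
    rw [PySem.List.length_pyRange_one]
    exact (Nat.div_lt_iff_lt_mul (by omega)).mpr hidx
  rw [List.getD_eq_getElem _ _ hk, PySem.List.getElem_pyRange_one]
  have hdivlt : idx / d < (b - a).toNat := (Nat.div_lt_iff_lt_mul (by omega)).mpr hidx
  have hne : (b - a).toNat ≠ 0 := by
    intro h0
    rw [h0, Nat.zero_mul] at hidx
    omega
  have hba : ((b - a).toNat : Int) = b - a := by omega
  set x : Int := a + ((idx / d : Nat) : Int) with hx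
  have hx0 : 0 ≤ x := by positivity
  have hxub : x < b := by
    have h2 : ((idx / d : Nat) : Int) < ((b - a).toNat : Int) := by exact_mod_cast hdivlt
    omega
  have hr : idx % d < d := Nat.mod_lt _ (by omega)
  rw [pvNNumeric_digits n hn2 hn16 d x hd hx0 (lt_of_lt_of_le hxub hub)
    (by rcases hlb with h | h
        · exact Or.inl h
        · exact Or.inr (le_trans h
            (by rw [hx]; exact le_add_of_nonneg_right (by positivity))))]
  rw [List.getD_eq_getElem _ _ (by simpa using hr)]
  simp

-- Correctness of B's block-skipping loop against the stream of A's representations.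
lemma pvCharLoop_eq (n : Int) (hn2 : 2 ≤ n) (hn16 : n ≤ 16) :
    ∀ (fuel : Nat) (idx : Int) (d : Nat) (N : Int), 1 ≤ d → 0 ≤ idx → idx.natAbs < fuel →
    (if d = 1 then (0:Int) else n ^ (d - 1)) ≤ N →
    idx < ((pvG n (if d = 1 then (0:Int) else n ^ (d - 1)) N).length : Int) →
    pvCharLoop n fuel idx (d : Int) (if d = 1 then (0:Int) else n ^ (d - 1))
        (n ^ d - (if d = 1 then (0:Int) else n ^ (d - 1)))
      = (pvG n (if d = 1 then (0:Int) else n ^ (d - 1)) N).getD idx.toNat ' ' := by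
  intro fuel
  induction fuel with
  | zero => intro idx d N _ _ hf; omega
  | succ fuel ih =>
    intro idx d N hd h0 hf hN hlen
    set S : Int := if d = 1 then (0:Int) else n ^ (d - 1) with hSdef
    have hnpos : (0:Int) < n := by omega
    have hS0 : 0 ≤ S := by
      rw [hSdef]; split_ifs
      · omega
      · positivity
    have hpowd : (0:Int) < n ^ d := by positivity
    have hSlt : S < n ^ d := by
      rw [hSdef]; split_ifs with h
      · exact hpowd
      · have hps : n ^ d = n ^ (d - 1) * n := by
          rw [← pow_succ]; congr 1; omega
        nlinarith [pow_pos hnpos (d - 1)]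
    have hlbS : d = 1 ∨ n ^ (d - 1) ≤ S := by
      by_cases h : d = 1
      · exact Or.inl h
      · exact Or.inr (by rw [hSdef, if_neg h])
    have hdpos : (0:Int) < (d : Int) := by exact_mod_cast Nat.pos_of_ne_zero (by omega)
    simp only [pvCharLoop]
    by_cases hc : (n ^ d - S) * (d : Int) ≤ idx
    · rw [if_pos hc]
      have hNd : n ^ d ≤ N := by
        by_contra hlt
        rw [not_le] at hlt
        have hlen' : (pvG n S N).length = (N - S).toNat * d :=
          pvG_block_len n hn2 hn16 d hd S N hS0 (le_of_lt hlt) hlbS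
        rw [hlen'] at hlen
        have h1 : ((N - S).toNat : Int) ≤ n ^ d - S := by omega
        have h2 : ((N - S).toNat : Int) * (d : Int) ≤ (n ^ d - S) * (d : Int) :=
          mul_le_mul_of_nonneg_right h1 (by omega)
        have h3 : ((((N - S).toNat * d : Nat)) : Int) = ((N - S).toNat : Int) * (d : Int) := by
          push_cast; ring
        rw [h3] at hlen
        linarith
      have hsplit := pvG_split n S (n ^ d) N (le_of_lt hSlt) hNd
      have hlen1 : (pvG n S (n ^ d)).length = (n ^ d - S).toNat * d :=
        pvG_block_len n hn2 hn16 d hd S (n ^ d) hS0 le_rfl hlbS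
      have hP : (((n ^ d - S).toNat * d : Nat) : Int) = (n ^ d - S) * (d : Int) := by
        push_cast [Int.toNat_of_nonneg (show (0:Int) ≤ n ^ d - S by omega)]; ring
      have hPpos : (0:Int) < (n ^ d - S) * (d : Int) := mul_pos (by omega) hdpos
      -- the recursive call is the statement at d + 1
      have hrec := ih (idx - (n ^ d - S) * (d : Int)) (d + 1) N (by omega) (by omega)
        (by omega)
        (by simp only [if_neg (show ¬ d + 1 = 1 by omega), Nat.add_sub_cancel]; exact hNd)
        (by
          simp only [if_neg (show ¬ d + 1 = 1 by omega), Nat.add_sub_cancel]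
          rw [hsplit, List.length_append, hlen1] at hlen
          push_cast at hlen ⊢
          omega)
      simp only [if_neg (show ¬ d + 1 = 1 by omega), Nat.add_sub_cancel] at hrec
      have hcast1 : ((d : Int)).toNat = d := Int.toNat_natCast d
      have hcast2 : ((d : Int) + 1) = ((d + 1 : Nat) : Int) := by push_cast; ring
      have hcast3 : n ^ d * (n - 1) = n ^ (d + 1) - n ^ d := by
        rw [pow_succ]; ring
      rw [hcast1, hcast2, hcast3, hrec]
      rw [hsplit, List.getD_append_right _ _ _ _ (by rw [hlen1]; omega)]
      congr 1
      rw [hlen1]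
      omega
    · rw [if_neg hc]
      rw [not_le] at hc
      set M : Int := min N (n ^ d) with hMdef
      have hSM : S ≤ M := le_min hN (le_of_lt hSlt)
      have hMN : M ≤ N := min_le_left _ _
      have hMd : M ≤ n ^ d := min_le_right _ _
      have hsplit := pvG_split n S M N hSM hMN
      have hlen1 : (pvG n S M).length = (M - S).toNat * d :=
        pvG_block_len n hn2 hn16 d hd S M hS0 hMd hlbS
      have hidxlt : idx.toNat < (M - S).toNat * d := by
        rcases le_total N (n ^ d) with h | h
        · have hM : M = N := min_eq_left h
          have hnil : pvG n M N = [] := by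
            unfold pvG
            rw [hM, PySem.List.pyRange_one_eq_nil le_rfl]
            simp
          rw [hsplit, List.length_append, hnil, hlen1] at hlen
          simp only [List.length_nil, Nat.add_zero] at hlen
          omega
        · have hM : M = n ^ d := min_eq_right h
          have hQ : (((M - S).toNat * d : Nat) : Int) = (n ^ d - S) * (d : Int) := by
            rw [hM]
            push_cast [Int.toNat_of_nonneg (show (0:Int) ≤ n ^ d - S by omega)]
            ring
          omega
      rw [hsplit, List.getD_append _ _ _ _ (by omega)]
      rw [pvG_block_getD n hn2 hn16 d hd S M hS0 hMd hlbS idx.toNat hidxlt]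
      have hidxc : idx = (idx.toNat : Int) := (Int.toNat_of_nonneg h0).symm
      have hfd : PySem.Int.floordiv idx (d : Int) = ((idx.toNat / d : Nat) : Int) := by
        rw [PySem.Int.floordiv_eq_ediv_of_pos hdpos, hidxc]
        exact Int.natCast_ediv _ _
      have hmd : PySem.Int.mod idx (d : Int) = ((idx.toNat % d : Nat) : Int) := by
        rw [PySem.Int.mod_eq_emod_of_pos hdpos, hidxc]
        exact Int.natCast_emod _ _
      rw [hfd, hmd]
      have hexp : ((d : Int) - 1 - ((idx.toNat % d : Nat) : Int)).toNat = d - 1 - idx.toNat % d := by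
        have hr : idx.toNat % d < d := Nat.mod_lt _ (by omega)
        omega
      rw [hexp]
      have hnum0 : (0:Int) ≤ S + ((idx.toNat / d : Nat) : Int) := by positivity
      have hppos : (0:Int) < n ^ (d - 1 - idx.toNat % d) := by positivity
      rw [PySem.Int.floordiv_eq_ediv_of_pos hppos, PySem.Int.mod_eq_emod_of_pos hnpos]

-- char_at(idx) reads the idx-th character of the stream of A's representations starting at 0.
lemma pvCharAt_eq (n : Int) (hn2 : 2 ≤ n) (hn16 : n ≤ 16) (idx N : Int) (h0 : 0 ≤ idx)
    (hN : 0 ≤ N) (hlen : idx < ((pvG n 0 N).length : Int)) :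
    pvCharAt n idx = (pvG n 0 N).getD idx.toNat ' ' := by
  have h := pvCharLoop_eq n hn2 hn16 (idx.natAbs + 1) idx 1 N le_rfl h0 (by omega)
    (by simpa using hN) (by simpa using hlen)
  simpa using h


lemma pv_length_le_flatMap {α β : Type} (l : List α) (g : α → List β)
    (h : ∀ x ∈ l, g x ≠ []) : l.length ≤ (l.flatMap g).length := by
  induction l with
  | nil => simp
  | cons x l ih =>
    simp only [List.flatMap_cons, List.length_append, List.length_cons]
    have h1 : 1 ≤ (g x).length := by
      have := h x (by simp)
      cases hg : g x with
      | nil => exact absurd hg this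
      | cons a b => simp
    have := ih (fun y hy => h y (by simp [hy]))
    omega

lemma pv_inner_fold (n : Int) (l : List Int) (acc : List Char) (s : Int) :
    l.foldl (fun (st : List Char × Int) _ => (st.1 ++ pvNNumeric st.2 n, st.2 + 1)) (acc, s)
      = (acc ++ (PySem.List.pyRange s (s + l.length) 1).flatMap (fun i => pvNNumeric i n),
         s + l.length) := by
  induction l generalizing acc s with
  | nil => simp [PySem.List.pyRange_one_eq_nil]
  | cons x l ih =>
    simp only [List.foldl_cons, List.length_cons]
    rw [ih]
    push_cast
    rw [show s + ((l.length : Int) + 1) = s + 1 + (l.length : Int) by omega]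
    have hlnn : (0:Int) ≤ l.length := by positivity
    conv_rhs => rw [PySem.List.pyRange_one_cons (show s < s + 1 + (l.length:Int) by omega)]
    simp [List.append_assoc]

lemma pv_outer_fold (n m : Int) (hm : 0 ≤ m) (l : List Int) (acc : List Char) (s : Int) :
    l.foldl (fun (st : List Char × Int) _ =>
        (PySem.List.pyRange 0 m 1).foldl
          (fun st _ => (st.1 ++ pvNNumeric st.2 n, st.2 + 1)) st) (acc, s)
      = (acc ++ (PySem.List.pyRange s (s + m * l.length) 1).flatMap (fun i => pvNNumeric i n),
         s + m * l.length) := by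
  induction l generalizing acc s with
  | nil => simp [PySem.List.pyRange_one_eq_nil]
  | cons x l ih =>
    simp only [List.foldl_cons, List.length_cons]
    rw [pv_inner_fold n (PySem.List.pyRange 0 m 1) acc s]
    have hlen : ((PySem.List.pyRange 0 m 1).length : Int) = m := by
      rw [PySem.List.length_pyRange_one]
      omega
    rw [hlen, ih]
    push_cast
    have hlnn : (0:Int) ≤ l.length := by positivity
    rw [show s + m * ((l.length : Int) + 1) = s + m + m * l.length by ring]
    rw [PySem.List.pyRange_one_append s (s + m) (s + m + m * l.length) (by omega)
        (by nlinarith)]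
    simp [List.append_assoc]

theorem pv_main (n t m p : Int) (hn2 : 2 ≤ n) (hn16 : n ≤ 16) (ht : 1 ≤ t) (hm : 1 ≤ m)
    (hp1 : 1 ≤ p) (hpm : p ≤ m) : solution n t m p = solution_alt n t m p := by
  simp only [solution, solution_alt]
  rw [pv_outer_fold n m (by omega) _ _ _]
  have hlen : ((PySem.List.pyRange 0 t 1).length : Int) = t := by
    rw [PySem.List.length_pyRange_one]; omega
  rw [hlen]
  simp only [zero_add, List.nil_append]
  rw [PySem.List.foldl_append_singleton_eq_map]
  simp only [List.nil_append]
  have htotal : (PySem.List.pyRange 0 (m * t) 1).flatMap (fun i => pvNNumeric i n)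
      = pvG n 0 (m * t) := rfl
  rw [htotal]
  have hmt1 : 1 ≤ m * t := by nlinarith
  have hLen : (m * t : Int) ≤ ((pvG n 0 (m * t)).length : Int) := by
    have h1 := pv_length_le_flatMap (PySem.List.pyRange 0 (m * t) 1)
      (fun x => pvNNumeric x n) (fun x hx => ?_)
    · have h2 : (PySem.List.pyRange 0 (m * t) 1).length = (m * t).toNat := by
        rw [PySem.List.length_pyRange_one]; congr 1; omega
      rw [h2] at h1
      have := (pvG n 0 (m * t)).length
      unfold pvG
      omega
    · obtain ⟨hx0, _⟩ := PySem.List.mem_pyRange_one.mp hx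
      have hx0' : 0 ≤ x := by omega
      simp only [pvNNumeric_eq_rev x n hx0' hn2 hn16, pvR]
      simp
  congr 1
  apply List.map_congr_left
  intro i hi
  obtain ⟨hi0, hit⟩ := PySem.List.mem_pyRange_one.mp hi
  set idx : Int := p - 1 + m * i with hidx
  have hidx0 : 0 ≤ idx := by
    have : 0 ≤ m * i := mul_nonneg (by omega) hi0
    omega
  have hidxlt : idx < m * t := by
    have h1 : m * i ≤ m * (t - 1) := mul_le_mul_of_nonneg_left (by omega) (by omega)
    have h2 : m * (t - 1) = m * t - m := by ring
    omega
  have hidxlen : idx < ((pvG n 0 (m * t)).length : Int) := by omega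
  rw [pvCharAt_eq n hn2 hn16 idx (m * t) hidx0 (by omega) hidxlen]
  rw [PySem.List.pyGetD_eq_getElem _ _ hidx0 hidxlen]
  rw [List.getD_eq_getElem _ _ (by omega)]

theorem pv_degenerate (n t m p : Int) (ht : t ≤ 0) :
    solution n t m p = solution_alt n t m p := by
  simp only [solution, solution_alt]
  rw [PySem.List.pyRange_one_eq_nil (show t ≤ 0 from ht)]
  simp

-- ===== VERDICT (by name: the statement is the Claim_ definition above) =====
theorem solution_spec : Claim_equal_solution := by
  intro n t m p _ hpre
  unfold Spec_solution
  rcases hpre with ⟨hn2, hn16, ht, hm, hp1, hpm⟩ | ht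
  · exact pv_main n t m p hn2 hn16 ht hm hp1 hpm
  · exact pv_degenerate n t m p ht
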